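-- pv_equiv track=rewrite | github.com/stelladong-RA/greenie-re-data-pipeline | pipelines/step3_zip_extraction.py | extract_zip
-- ===== SOURCE A (Python) =====
-- def extract_zip(address: str) -> str | None:
--     """
--     Extract a 5-digit ZIP from address:
--
--     - if not a string -> None
--     - keep only digits
--     - require at least 5 digits
--     - take LAST 5
--     - zero-pad to length 5
--     """
--     if not isinstance(address, str):
--         return None
--
--     digits = "".join(c for c in address if c.isdigit())
--     if len(digits) < 5:
--         return None
--
--     zip5 = digits[-5:]
--     zip5 = zip5.zfill(5)
--     return zip5
-- ===== SOURCE B (Python) =====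
-- def extract_zip(address: str) -> str | None:
--     if not isinstance(address, str):
--         return None
--     buf = []
--     for c in reversed(address):
--         if c.isdigit():
--             buf.append(c)
--             if len(buf) == 5:
--                 break
--     if len(buf) < 5:
--         return None
--     return "".join(reversed(buf))
-- ===== Notes on version B (the rewrite author's own statement) =====
-- stated objective: faster
-- what changed: Instead of joining all digits left-to-right and slicing the last 5 (plus a no-op zfill), B scans the address right-to-left keeping only a bounded 5-char buffer and stops as soon as 5 digits are found.
import Mathlib
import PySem

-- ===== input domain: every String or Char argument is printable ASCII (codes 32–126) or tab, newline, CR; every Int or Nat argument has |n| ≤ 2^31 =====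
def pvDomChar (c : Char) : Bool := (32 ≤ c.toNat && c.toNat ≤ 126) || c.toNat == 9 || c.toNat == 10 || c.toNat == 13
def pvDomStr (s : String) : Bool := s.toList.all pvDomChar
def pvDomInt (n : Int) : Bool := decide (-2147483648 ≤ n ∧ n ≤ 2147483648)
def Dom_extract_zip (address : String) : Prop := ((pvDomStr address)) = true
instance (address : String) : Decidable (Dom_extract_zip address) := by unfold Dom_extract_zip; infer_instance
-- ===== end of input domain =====

-- B replaces A's full left-to-right digit-join-then-slice with a right-to-left scan keeping
-- only a bounded 5-char buffer with early exit (objective: alternative decomposition).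

-- ===== PORT A =====
-- A: join all digits, require ≥ 5, take the last 5 (slice [-5:]), zfill to 5.
def extract_zip (address : String) : Option String :=
  let digits := address.toList.filter (fun c => PySem.Chars.isdigit c)
  if digits.length < 5 then none
  else
    let zip5 := PySem.List.slice digits (some (-5)) none
    some (String.ofList (PySem.Chars.zfill zip5 5))

-- ===== PORT B =====
-- B: scan reversed(address), append digits to buf, break once len(buf) == 5.
def pvAltLoop (cs : List Char) (buf : List Char) : List Char :=
  match cs with
  | [] => buf
  | c :: t =>
    if PySem.Chars.isdigit c then
      let buf' := buf ++ [c]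
      if buf'.length == 5 then buf' else pvAltLoop t buf'
    else pvAltLoop t buf

def extract_zip_alt (address : String) : Option String :=
  let buf := pvAltLoop address.toList.reverse []
  if buf.length < 5 then none else some (String.ofList buf.reverse)

-- ===== PRECONDITION & SPEC =====
def Spec_extract_zip (address : String) (out : Option String) : Prop := out = extract_zip_alt address
instance (address : String) (out : Option String) : Decidable (Spec_extract_zip address out) := by unfold Spec_extract_zip; infer_instance

-- ===== CLAIM (what is proved, stated in full; the proofs are below) =====
def Claim_equal_extract_zip : Prop := ∀ (address : String), Dom_extract_zip address → Spec_extract_zip address (extract_zip address)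

-- ===== LEMMAS AND PROOFS =====

-- B's loop collects exactly the first (5 - |buf|) digits of its input, appended to buf.
theorem pvAltLoop_eq (cs : List Char) : ∀ (buf : List Char), buf.length < 5 →
    pvAltLoop cs buf = buf ++ (cs.filter (fun c => PySem.Chars.isdigit c)).take (5 - buf.length) := by
  induction cs with
  | nil => intro buf _; simp [pvAltLoop]
  | cons c t ih =>
    intro buf hb
    simp only [pvAltLoop]
    by_cases hd : PySem.Chars.isdigit c = true
    · rw [if_pos hd, List.filter_cons_of_pos hd]
      by_cases h5 : buf.length + 1 = 5
      · have heq : ((buf ++ [c]).length == 5) = true := by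
          simp only [beq_iff_eq, List.length_append, List.length_cons, List.length_nil]; omega
        rw [if_pos heq]
        have h1 : 5 - buf.length = 1 := by omega
        simp [h1]
      · have hne : ¬ ((buf ++ [c]).length == 5) = true := by
          simp only [beq_iff_eq, List.length_append, List.length_cons, List.length_nil]; omega
        rw [if_neg hne]
        have hlt : (buf ++ [c]).length < 5 := by
          simp only [List.length_append, List.length_cons, List.length_nil]; omega
        rw [ih (buf ++ [c]) hlt]
        have h2 : 5 - buf.length = (5 - (buf ++ [c]).length) + 1 := by
          simp only [List.length_append, List.length_cons, List.length_nil]; omega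
        rw [h2, List.take_succ_cons, List.append_assoc, List.singleton_append]
    · rw [if_neg hd, List.filter_cons_of_neg (by simpa using hd)]
      exact ih buf hb

theorem pvAltLoop_reverse (l : List Char) :
    (pvAltLoop l.reverse []).reverse =
      (l.filter (fun c => PySem.Chars.isdigit c)).drop
        ((l.filter (fun c => PySem.Chars.isdigit c)).length - 5) := by
  rw [pvAltLoop_eq l.reverse [] (by norm_num)]
  simp only [List.nil_append, List.length_nil, Nat.sub_zero, List.filter_reverse,
    List.reverse_take, List.reverse_reverse, List.length_reverse]

theorem pvAltLoop_length (l : List Char) :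
    (pvAltLoop l.reverse []).length =
      min 5 (l.filter (fun c => PySem.Chars.isdigit c)).length := by
  rw [pvAltLoop_eq l.reverse [] (by norm_num)]
  simp [List.filter_reverse, Nat.min_comm]

-- ===== VERDICT (by name: the statement is the Claim_ definition above) =====
theorem extract_zip_spec : Claim_equal_extract_zip := by
  intro address _
  simp only [Spec_extract_zip, extract_zip, extract_zip_alt]
  set ys := address.toList.filter (fun c => PySem.Chars.isdigit c) with hys
  have hlen : (pvAltLoop address.toList.reverse []).length = min 5 ys.length :=
    pvAltLoop_length address.toList
  by_cases h : ys.length < 5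
  · rw [if_pos h, if_pos (by omega)]
  · rw [if_neg h, if_neg (by omega)]
    rw [PySem.List.slice_from_neg_ofNat ys 5 (by norm_num)]
    have hz : PySem.Chars.zfill (ys.drop (ys.length - 5)) 5 = ys.drop (ys.length - 5) := by
      rw [PySem.Chars.zfill.eq_def, if_pos (by simp; omega)]
    rw [hz, pvAltLoop_reverse, ← hys]
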